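-- pv_equiv track=rewrite | github.com/Club-d/Big | Data Stream/MisraGries.py | Misra_Gries
-- ===== SOURCE A (Python) =====
-- def Misra_Gries(data, size):
--
--     Mis_Gri_dic = {}
--     decrement = 0
--
--     for element in data:
--
--         if len(Mis_Gri_dic) < size: #if the bucket is not full
--
--             if element in Mis_Gri_dic:
--                 Mis_Gri_dic[ element ] = Mis_Gri_dic[element] + 1 #if this category exists in the dictionary, then count the true frequency
--
--             else:
--                 Mis_Gri_dic[ element] = 1 #initialise the new category frequency as 1
--
--             continue
--
--         if len(Mis_Gri_dic) == size: #if the bucket is already full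
--
--             if element in Mis_Gri_dic:
--                 Mis_Gri_dic[ element ] = Mis_Gri_dic[element] + 1 #if this category exists in the dictionary, then count the true frequency
--
--             else:
--                 decrement = decrement + 1 #count decrement step
--
--                 Mis_Gri_dic = {key: value - 1 for key, value in Mis_Gri_dic.items()} #existing category deduct 1 frequency
--
--                 delete_keys = [key for key, value in Mis_Gri_dic.items() if value == 0]#if the frequency equals to 0, then this category needs to be deleted
--
--
--
--                 for key in delete_keys:
--                     del Mis_Gri_dic[key]
--
--             continue
--
--     return Mis_Gri_dic,decrement
-- ===== SOURCE B (Python) =====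
-- def Misra_Gries(data, size):
--     # Run-batched Misra-Gries: degenerate sizes are handled by closed forms, and
--     # for positive size the stream is consumed run by run (maximal blocks of equal
--     # consecutive elements); a whole run is absorbed by one arithmetic update on a
--     # raw-count dict with a shared decrement offset (effective count = raw - offset),
--     # using min(raw counts) to jump over a block of decrement steps at once.
--     if size < 0:
--         return {}, 0
--     if size == 0:
--         return {}, len(data)
--     counts = {}
--     offset = 0
--     i = 0
--     n = len(data)
--     while i < n:
--         e = data[i]
--         j = i + 1
--         while j < n and data[j] == e:
--             j += 1
--         k = j - i  # length of the run of e
--         if e in counts: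
--             counts[e] += k
--         elif len(counts) < size:
--             counts[e] = offset + k
--         else:
--             # bucket full, e absent: t decrement steps kill the minimal keys
--             t = min(counts.values()) - offset
--             d = min(k, t)
--             offset += d
--             if d == t:
--                 for key in [q for q, v in counts.items() if v == offset]:
--                     del counts[key]
--                 if k > t:
--                     counts[e] = offset + (k - t)
--         i = j
--     return {q: v - offset for q, v in counts.items()}, offset
-- ===== Notes on version B (the rewrite author's own statement) =====
-- stated objective: alternative
-- what changed: B handles size<0 and size==0 by closed forms and, for positive size, consumes the stream run by run (maximal blocks of equal consecutive elements), absorbing each whole run in one arithmetic update on a raw-count dict with a shared decrement offset, using min(raw counts) to jump over a block of decrement steps at once, instead of A's element-by-element loop that rebuilds the whole dict at every decrement.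
import Mathlib
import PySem

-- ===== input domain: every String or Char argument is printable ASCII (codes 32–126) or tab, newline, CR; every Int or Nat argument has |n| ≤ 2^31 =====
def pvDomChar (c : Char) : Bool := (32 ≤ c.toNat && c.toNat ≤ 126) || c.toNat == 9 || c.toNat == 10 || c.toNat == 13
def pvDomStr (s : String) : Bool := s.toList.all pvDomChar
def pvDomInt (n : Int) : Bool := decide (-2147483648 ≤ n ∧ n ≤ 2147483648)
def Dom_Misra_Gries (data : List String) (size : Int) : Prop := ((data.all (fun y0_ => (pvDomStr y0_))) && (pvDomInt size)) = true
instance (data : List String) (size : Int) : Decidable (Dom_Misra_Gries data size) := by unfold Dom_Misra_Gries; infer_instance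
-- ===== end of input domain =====

-- B replaces A's element-by-element pass (which rewrites every counter at each decrement)
-- by a run-batched pass: closed forms for size ≤ 0, and for positive size the stream is
-- consumed run by run, each run absorbed in one arithmetic update on raw counts with a
-- shared offset, using min(raw counts) to jump over a block of decrement steps at once.
-- Objective: alternative algorithmic decomposition (not claimed faster).

-- ===== PORT A =====
-- loop body of A (d[element] is guarded by 'element in', so getD 0 is exact)
def MGstepA (size : Int) (st : PySem.Dict String Int × Int) (element : String) :
    PySem.Dict String Int × Int :=
  let d := st.1
  let dec := st.2
  if (d.size : Int) < size then
    if d.contains element then (d.insert element (d.getD element 0 + 1), dec)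
    else (d.insert element 1, dec)
  else if (d.size : Int) = size then
    if d.contains element then (d.insert element (d.getD element 0 + 1), dec)
    else
      let dec' := dec + 1
      let d' : PySem.Dict String Int := ⟨d.items.map (fun p => (p.1, p.2 - 1))⟩
      let deleteKeys := (d'.items.filter (fun p => p.2 == 0)).map (·.1)
      (deleteKeys.foldl (fun dd k => dd.erase k) d', dec')
  else (d, dec)

def Misra_Gries (data : List String) (size : Int) : (List (String × Int)) × Int :=
  let st := data.foldl (MGstepA size) (PySem.Dict.empty, 0)
  (st.1.items, st.2)

-- ===== PORT B =====
-- Source B's inner while loop: split off the maximal run of equal leading elements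
-- (run length kept as a Nat — it is the length j - i of a block of the list)
def MGruns : List String → List (String × Nat)
  | [] => []
  | e :: rest =>
      (e, 1 + (rest.takeWhile (fun x => x == e)).length) ::
        MGruns (rest.dropWhile (fun x => x == e))
termination_by l => l.length
decreasing_by
  simp only [List.length_cons]
  exact Nat.lt_succ_of_le (List.length_dropWhile_le _ rest)

-- Source B's per-run update on (counts, offset)
def MGrunStep (size : Int) (st : PySem.Dict String Int × Int) (e : String) (k : Nat) :
    PySem.Dict String Int × Int :=
  let c := st.1
  let off := st.2
  if c.contains e then (c.insert e (c.getD e 0 + (k : Int)), off)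
  else if (c.size : Int) < size then (c.insert e (off + (k : Int)), off)
  else
    -- bucket full, e absent: t decrement steps kill the minimal keys
    -- (min(counts.values()); the dict is nonempty whenever this branch is reached)
    let t := (PySem.List.min? c.values (fun v => v)).getD 0 - off
    let d := min (k : Int) t
    let off' := off + d
    if d = t then
      let dk := (c.items.filter (fun p => p.2 == off')).map (·.1)
      let c' := dk.foldl (fun dd q => dd.erase q) c
      if (k : Int) > t then (c'.insert e (off' + ((k : Int) - t)), off') else (c', off')
    else (c, off')

def Misra_Gries_alt (data : List String) (size : Int) : (List (String × Int)) × Int :=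
  if size < 0 then ([], 0)
  else if size = 0 then ([], (data.length : Int))
  else
    let st := (MGruns data).foldl (fun st p => MGrunStep size st p.1 p.2) (PySem.Dict.empty, 0)
    (st.1.items.map (fun p => (p.1, p.2 - st.2)), st.2)

-- ===== PRECONDITION & SPEC =====
def Spec_Misra_Gries (data : List String) (size : Int) (out : (List (String × Int)) × Int) : Prop := out = Misra_Gries_alt data size
instance (data : List String) (size : Int) (out : (List (String × Int)) × Int) : Decidable (Spec_Misra_Gries data size out) := by unfold Spec_Misra_Gries; infer_instance

-- ===== CLAIM (what is proved, stated in full; the proofs are below) =====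
def Claim_equal_Misra_Gries : Prop := ∀ (data : List String) (size : Int), Dom_Misra_Gries data size → Spec_Misra_Gries data size (Misra_Gries data size)

-- ===== LEMMAS AND PROOFS =====

-- proof-only intermediate: A's loop body in offset form (raw counts + shared offset)
def MGstepB (size : Int) (st : PySem.Dict String Int × Int) (element : String) :
    PySem.Dict String Int × Int :=
  let c := st.1
  let off := st.2
  if (c.size : Int) < size then
    (c.insert element (c.getD element off + 1), off)
  else if (c.size : Int) = size then
    if c.contains element then (c.insert element (c.getD element 0 + 1), off)
    else
      let off' := off + 1
      let dk := (c.items.filter (fun p => p.2 == off')).map (·.1)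
      (dk.foldl (fun dd k => dd.erase k) c, off')
  else (c, off)

-- shift every stored count down by v
def MGsh (v : Int) (l : List (String × Int)) : List (String × Int) :=
  l.map (fun p => (p.1, p.2 - v))

theorem MGsh_contains (v : Int) (d : PySem.Dict String Int) (e : String) :
    (PySem.Dict.mk (MGsh v d.items)).contains e = d.contains e := by
  simp [PySem.Dict.contains, MGsh, List.any_map, Function.comp_def]

theorem MGsh_get? (v : Int) (d : PySem.Dict String Int) (e : String) :
    (PySem.Dict.mk (MGsh v d.items)).get? e = (d.get? e).map (· - v) := by
  simp [PySem.Dict.get?, MGsh, List.find?_map, Function.comp_def]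

theorem MGsh_getD_hit (v w : Int) (d : PySem.Dict String Int) (e : String)
    (ho : d.get? e = some w) :
    (PySem.Dict.mk (MGsh v d.items)).getD e 0 = w - v := by
  simp [PySem.Dict.getD, MGsh_get?, ho]

theorem MGsh_insert_hit (v w : Int) (d : PySem.Dict String Int) (e : String)
    (h : d.contains e = true) :
    ((PySem.Dict.mk (MGsh v d.items)).insert e (w - v)).items
      = MGsh v ((d.insert e w).items) := by
  have h' : (PySem.Dict.mk (MGsh v d.items)).contains e = true := by rw [MGsh_contains]; exact h
  simp only [PySem.Dict.insert, h, h', if_true]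
  simp only [MGsh, List.map_map]
  apply List.map_congr_left
  intro p _
  by_cases hpe : p.1 = e <;> simp [hpe]

theorem MGsh_insert_miss (v w : Int) (d : PySem.Dict String Int) (e : String)
    (h : d.contains e = false) :
    ((PySem.Dict.mk (MGsh v d.items)).insert e (w - v)).items
      = MGsh v ((d.insert e w).items) := by
  have h' : (PySem.Dict.mk (MGsh v d.items)).contains e = false := by rw [MGsh_contains]; exact h
  simp only [PySem.Dict.insert, h, h', Bool.false_eq_true, if_false]
  simp [MGsh]

theorem MGsh_erase (v : Int) (d : PySem.Dict String Int) (k : String) :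
    ((PySem.Dict.mk (MGsh v d.items)).erase k).items = MGsh v ((d.erase k).items) := by
  simp [PySem.Dict.erase, MGsh, List.filter_map, Function.comp_def]

theorem MGsh_erase_fold (v : Int) (ks : List String) :
    ∀ (d : PySem.Dict String Int),
    (ks.foldl (fun dd k => dd.erase k) (PySem.Dict.mk (MGsh v d.items))).items
      = MGsh v ((ks.foldl (fun dd k => dd.erase k) d).items) := by
  induction ks with
  | nil => intro d; rfl
  | cons k ks ih =>
    intro d
    have h1 : (PySem.Dict.mk (MGsh v d.items)).erase k
        = PySem.Dict.mk (MGsh v ((d.erase k).items)) :=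
      PySem.Dict.ext (MGsh_erase v d k)
    simp only [List.foldl_cons, h1]
    exact ih (d.erase k)

-- the per-step simulation: A's state is the offset state with counts shifted by the offset
theorem MGstep_rel (size : Int) (c : PySem.Dict String Int) (off : Int) (e : String) :
    (MGstepA size (PySem.Dict.mk (MGsh off c.items), off) e).1.items
        = MGsh (MGstepB size (c, off) e).2 (MGstepB size (c, off) e).1.items
    ∧ (MGstepA size (PySem.Dict.mk (MGsh off c.items), off) e).2 = (MGstepB size (c, off) e).2 := by
  simp only [MGstepA, MGstepB]
  have hsz : ((PySem.Dict.mk (MGsh off c.items)).size : Int) = (c.size : Int) := by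
    simp [PySem.Dict.size, MGsh]
  rw [hsz]
  by_cases hlt : ((c.size : Int) < size)
  · simp only [hlt, if_true]
    by_cases hc : c.contains e = true
    · -- hit with room
      have hc' : (PySem.Dict.mk (MGsh off c.items)).contains e = true := by
        rw [MGsh_contains]; exact hc
      simp only [hc', if_true]
      refine ⟨?_, trivial⟩
      obtain ⟨w, ho⟩ : ∃ w, c.get? e = some w := by
        have := PySem.Dict.contains_eq_isSome_get? c e
        rw [hc] at this
        exact Option.isSome_iff_exists.mp this.symm
      have hval : (PySem.Dict.mk (MGsh off c.items)).getD e 0 + 1 = (c.getD e off + 1) - off := by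
        rw [MGsh_getD_hit off w c e ho]
        simp [PySem.Dict.getD, ho]
        ring
      rw [hval]
      exact MGsh_insert_hit off (c.getD e off + 1) c e hc
    · -- miss with room: A inserts 1, the offset form inserts off+1
      have hcf : c.contains e = false := by simpa using hc
      have hc' : (PySem.Dict.mk (MGsh off c.items)).contains e = false := by
        rw [MGsh_contains]; exact hcf
      simp only [hc', Bool.false_eq_true, if_false]
      refine ⟨?_, trivial⟩
      have hnone : c.get? e = none := (PySem.Dict.get?_eq_none_iff_contains c e).mpr hcf
      have hval : (c.getD e off + 1) - off = 1 := by
        simp [PySem.Dict.getD, hnone]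
      have hins := MGsh_insert_miss off (c.getD e off + 1) c e hcf
      rw [hval] at hins
      exact hins
  · simp only [hlt, if_false]
    by_cases heq : ((c.size : Int) = size)
    · simp only [heq, if_true]
      by_cases hc : c.contains e = true
      · have hc' : (PySem.Dict.mk (MGsh off c.items)).contains e = true := by
          rw [MGsh_contains]; exact hc
        simp only [hc, hc', if_true]
        refine ⟨?_, trivial⟩
        obtain ⟨w, ho⟩ : ∃ w, c.get? e = some w := by
          have := PySem.Dict.contains_eq_isSome_get? c e
          rw [hc] at this
          exact Option.isSome_iff_exists.mp this.symm
        have hval : (PySem.Dict.mk (MGsh off c.items)).getD e 0 + 1 = (c.getD e 0 + 1) - off := by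
          rw [MGsh_getD_hit off w c e ho]
          simp [PySem.Dict.getD, ho]
          ring
        rw [hval]
        exact MGsh_insert_hit off (c.getD e 0 + 1) c e hc
      · have hcf : c.contains e = false := by simpa using hc
        have hc' : (PySem.Dict.mk (MGsh off c.items)).contains e = false := by
          rw [MGsh_contains]; exact hcf
        simp only [hcf, hc', Bool.false_eq_true, if_false]
        -- decrement step: A's shifted-by-one dict is the raw counts shifted by off+1
        have hshift : (PySem.Dict.mk (MGsh off c.items)).items.map (fun p => (p.1, p.2 - 1))
            = MGsh (off + 1) c.items := by
          simp only [MGsh, List.map_map]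
          apply List.map_congr_left
          intro p _
          simp
          ring
        have hkeys : ((MGsh (off + 1) c.items).filter (fun p => p.2 == 0)).map (·.1)
            = (c.items.filter (fun p => p.2 == off + 1)).map (·.1) := by
          simp only [MGsh, List.filter_map, List.map_map]
          congr 1
          apply List.filter_congr
          intro p _
          simp
          omega
        refine ⟨?_, trivial⟩
        simp only [hshift, hkeys]
        exact MGsh_erase_fold (off + 1) ((c.items.filter (fun p => p.2 == off + 1)).map (·.1)) c
    · simp only [heq, if_false]
      constructor <;> trivial

-- fold the simulation over the whole stream
theorem MGfold_rel (size : Int) (data : List String) :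
    ∀ (c : PySem.Dict String Int) (off : Int),
    (data.foldl (MGstepA size) (PySem.Dict.mk (MGsh off c.items), off)).1.items
        = MGsh (data.foldl (MGstepB size) (c, off)).2 (data.foldl (MGstepB size) (c, off)).1.items
    ∧ (data.foldl (MGstepA size) (PySem.Dict.mk (MGsh off c.items), off)).2
        = (data.foldl (MGstepB size) (c, off)).2 := by
  induction data with
  | nil => intro c off; exact ⟨rfl, rfl⟩
  | cons e rest ih =>
    intro c off
    obtain ⟨h1, h2⟩ := MGstep_rel size c off e
    simp only [List.foldl_cons]
    have hA : MGstepA size (PySem.Dict.mk (MGsh off c.items), off) e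
        = (PySem.Dict.mk (MGsh (MGstepB size (c, off) e).2 (MGstepB size (c, off) e).1.items),
           (MGstepB size (c, off) e).2) :=
      Prod.ext (PySem.Dict.ext h1) h2
    rw [hA]
    have := ih (MGstepB size (c, off) e).1 (MGstepB size (c, off) e).2
    rwa [show ((MGstepB size (c, off) e).1, (MGstepB size (c, off) e).2) = MGstepB size (c, off) e from rfl] at this

-- ---- degenerate sizes: A's loop is a closed form ----

theorem MGstepA_neg (size : Int) (h : size < 0) (st : PySem.Dict String Int × Int) (e : String) :
    MGstepA size st e = st := by
  have h0 : (0 : Int) ≤ (st.1.size : Int) := Int.natCast_nonneg _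
  have h1 : ¬ ((st.1.size : Int) < size) := by omega
  have h2 : ¬ ((st.1.size : Int) = size) := by omega
  simp [MGstepA, h1, h2]

theorem MGfoldA_neg (size : Int) (h : size < 0) (data : List String) :
    ∀ (st : PySem.Dict String Int × Int), data.foldl (MGstepA size) st = st := by
  induction data with
  | nil => intro st; rfl
  | cons e rest ih =>
    intro st
    simp only [List.foldl_cons, MGstepA_neg size h st e]
    exact ih st

theorem MGstepA_zero (dec : Int) (e : String) :
    MGstepA 0 (PySem.Dict.empty, dec) e = (PySem.Dict.empty, dec + 1) := by
  simp [MGstepA, PySem.Dict.empty, PySem.Dict.size, PySem.Dict.contains]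

theorem MGfoldA_zero (data : List String) :
    ∀ (dec : Int), data.foldl (MGstepA 0) (PySem.Dict.empty, dec) = (PySem.Dict.empty, dec + data.length) := by
  induction data with
  | nil => intro dec; simp
  | cons e rest ih =>
    intro dec
    simp only [List.foldl_cons, MGstepA_zero]
    rw [ih (dec + 1)]
    refine Prod.ext rfl ?_
    simp only [List.length_cons]
    push_cast
    ring

-- ---- erase-fold characterisation ----

theorem MGeraseFold_items (dk : List String) :
    ∀ (c : PySem.Dict String Int),
    (dk.foldl (fun dd q => dd.erase q) c).items
      = c.items.filter (fun p => decide (p.1 ∉ dk)) := by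
  induction dk with
  | nil => intro c; simp
  | cons q dk ih =>
    intro c
    simp only [List.foldl_cons]
    rw [ih (c.erase q)]
    show ((c.items.filter (fun p => !(p.1 == q))).filter (fun p => decide (p.1 ∉ dk)))
        = c.items.filter (fun p => decide (p.1 ∉ q :: dk))
    rw [List.filter_filter]
    apply List.filter_congr
    intro p _
    by_cases h1 : p.1 = q <;> by_cases h2 : p.1 ∈ dk <;> simp [h1, h2]

theorem MGcontains_filter (c : PySem.Dict String Int) (q : String × Int → Bool) (e : String)
    (h : c.contains e = false) : (PySem.Dict.mk (c.items.filter q)).contains e = false := by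
  rw [PySem.Dict.contains_eq_decide_mem_keys] at h ⊢
  simp only [PySem.Dict.keys] at h ⊢
  simp only [decide_eq_false_iff_not, List.mem_map] at h ⊢
  rintro ⟨p, hp, hpe⟩
  exact h ⟨p, (List.mem_filter.mp hp).1, hpe⟩

-- ---- invariant: counts bounded by size, every raw count above the offset ----

theorem MGstepB_inv (size : Int) (c : PySem.Dict String Int) (off : Int) (e : String)
    (hsz : (c.size : Int) ≤ size) (hv : ∀ p ∈ c.items, off < p.2) :
    ((MGstepB size (c, off) e).1.size : Int) ≤ size ∧
    ∀ p ∈ (MGstepB size (c, off) e).1.items, (MGstepB size (c, off) e).2 < p.2 := by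
  simp only [MGstepB]
  by_cases hlt : ((c.size : Int) < size)
  · simp only [hlt, if_true]
    constructor
    · rw [PySem.Dict.size_insert]
      split <;> push_cast <;> omega
    · intro p hp
      rcases (PySem.Dict.mem_items_insert _ _ _ p).mp hp with h | ⟨h, _⟩
      · subst h
        show off < c.getD e off + 1
        by_cases hc : c.contains e = true
        · obtain ⟨w, ho⟩ : ∃ w, c.get? e = some w := by
            have := PySem.Dict.contains_eq_isSome_get? c e
            rw [hc] at this
            exact Option.isSome_iff_exists.mp this.symm
          rw [PySem.Dict.getD_of_get?_eq_some c off ho]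
          have hw := hv (e, w) (PySem.Dict.mem_items_of_get?_eq_some c ho)
          simp only at hw
          omega
        · have hcf : c.contains e = false := by simpa using hc
          rw [PySem.Dict.getD_of_not_contains c off hcf]
          omega
      · exact hv p h
  · simp only [hlt, if_false]
    by_cases heq : ((c.size : Int) = size)
    · simp only [heq, if_true]
      by_cases hc : c.contains e = true
      · simp only [hc, if_true]
        constructor
        · rw [PySem.Dict.size_insert, if_pos hc]; omega
        · intro p hp
          rcases (PySem.Dict.mem_items_insert _ _ _ p).mp hp with h | ⟨h, _⟩
          · subst h
            show off < c.getD e 0 + 1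
            obtain ⟨w, ho⟩ : ∃ w, c.get? e = some w := by
              have := PySem.Dict.contains_eq_isSome_get? c e
              rw [hc] at this
              exact Option.isSome_iff_exists.mp this.symm
            rw [PySem.Dict.getD_of_get?_eq_some c 0 ho]
            have hw := hv (e, w) (PySem.Dict.mem_items_of_get?_eq_some c ho)
            simp only at hw
            omega
          · exact hv p h
      · simp only [hc, Bool.false_eq_true, if_false]
        constructor
        · have hlen : (((c.items.filter (fun p => p.2 == off + 1)).map (·.1)).foldl
              (fun dd k => dd.erase k) c).items.length ≤ c.items.length := by
            rw [MGeraseFold_items]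
            exact List.length_filter_le _ _
          simp only [PySem.Dict.size] at hsz ⊢
          omega
        · intro p hp
          rw [MGeraseFold_items] at hp
          rw [List.mem_filter] at hp
          obtain ⟨hmem, hnot⟩ := hp
          have h1 : off < p.2 := hv p hmem
          by_cases h2 : p.2 = off + 1
          · exfalso
            have : p.1 ∈ (c.items.filter (fun p => p.2 == off + 1)).map (·.1) :=
              List.mem_map.mpr ⟨p, List.mem_filter.mpr ⟨hmem, by simp [h2]⟩, rfl⟩
            simp only [decide_eq_true_eq] at hnot
            exact hnot this
          · omega
    · simp only [heq, if_false]
      exact ⟨hsz, hv⟩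

theorem MGfoldB_inv (size : Int) (l : List String) :
    ∀ (c : PySem.Dict String Int) (off : Int),
    (c.size : Int) ≤ size → (∀ p ∈ c.items, off < p.2) →
    (((l.foldl (MGstepB size) (c, off)).1.size : Int) ≤ size ∧
     ∀ p ∈ (l.foldl (MGstepB size) (c, off)).1.items, (l.foldl (MGstepB size) (c, off)).2 < p.2) := by
  induction l with
  | nil => intro c off h1 h2; exact ⟨h1, h2⟩
  | cons e rest ih =>
    intro c off h1 h2
    obtain ⟨g1, g2⟩ := MGstepB_inv size c off e h1 h2
    simp only [List.foldl_cons]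
    have := ih (MGstepB size (c, off) e).1 (MGstepB size (c, off) e).2 g1 g2
    rwa [show ((MGstepB size (c, off) e).1, (MGstepB size (c, off) e).2) = MGstepB size (c, off) e from rfl] at this

-- ---- single offset steps, by case ----

theorem MGstepB_hit (size : Int) (c : PySem.Dict String Int) (off v : Int) (e : String)
    (ho : c.get? e = some v) (hsz : (c.size : Int) ≤ size) :
    MGstepB size (c, off) e = (c.insert e (v + 1), off) := by
  have hc : c.contains e = true := by
    rw [PySem.Dict.contains_eq_isSome_get?, ho]; rfl
  by_cases hlt : ((c.size : Int) < size)
  · simp [MGstepB, hlt, PySem.Dict.getD_of_get?_eq_some c off ho]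
  · have heq : ((c.size : Int) = size) := by omega
    simp [MGstepB, heq, hc, PySem.Dict.getD_of_get?_eq_some c 0 ho]

theorem MGstepB_room_miss (size : Int) (c : PySem.Dict String Int) (off : Int) (e : String)
    (hc : c.contains e = false) (hlt : (c.size : Int) < size) :
    MGstepB size (c, off) e = (c.insert e (off + 1), off) := by
  simp [MGstepB, hlt, PySem.Dict.getD_of_not_contains c off hc]

theorem MGstepB_full_miss (size : Int) (c : PySem.Dict String Int) (off : Int) (e : String)
    (hc : c.contains e = false) (heq : (c.size : Int) = size) (_hpos : 0 < size) :
    MGstepB size (c, off) e =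
      (((c.items.filter (fun p => p.2 == off + 1)).map (·.1)).foldl (fun dd q => dd.erase q) c,
       off + 1) := by
  have hlt : ¬ ((c.size : Int) < size) := by omega
  simp [MGstepB, heq, hc]

-- ---- iterated offset steps over a run ----

theorem MGhit_iter (size : Int) (e : String) :
    ∀ (m : Nat) (c : PySem.Dict String Int) (off v : Int),
    c.get? e = some v → (c.size : Int) ≤ size →
    (List.replicate (m + 1) e).foldl (MGstepB size) (c, off)
      = (c.insert e (v + ((m : Int) + 1)), off) := by
  intro m
  induction m with
  | zero =>
    intro c off v ho hsz
    simp only [List.replicate_succ, List.replicate_zero, List.foldl_cons, List.foldl_nil]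
    rw [MGstepB_hit size c off v e ho hsz]
    norm_num
  | succ m ih =>
    intro c off v ho hsz
    rw [List.replicate_succ, List.foldl_cons, MGstepB_hit size c off v e ho hsz]
    have hc : c.contains e = true := by
      rw [PySem.Dict.contains_eq_isSome_get?, ho]; rfl
    have ho' : (c.insert e (v + 1)).get? e = some (v + 1) := PySem.Dict.get?_insert_self c e (v + 1)
    have hsz' : (((c.insert e (v + 1)).size : Int)) ≤ size := by
      rw [PySem.Dict.size_insert, if_pos hc]; exact hsz
    rw [ih (c.insert e (v + 1)) off (v + 1) ho' hsz']
    rw [PySem.Dict.insert_insert_self]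
    refine Prod.ext ?_ rfl
    congr 1
    push_cast
    ring

theorem MGroom_iter (size : Int) (e : String) (m : Nat) (c : PySem.Dict String Int) (off : Int)
    (hc : c.contains e = false) (hlt : (c.size : Int) < size) :
    (List.replicate (m + 1) e).foldl (MGstepB size) (c, off)
      = (c.insert e (off + ((m : Int) + 1)), off) := by
  rw [List.replicate_succ, List.foldl_cons, MGstepB_room_miss size c off e hc hlt]
  cases m with
  | zero => norm_num
  | succ m =>
    have ho' : (c.insert e (off + 1)).get? e = some (off + 1) := PySem.Dict.get?_insert_self c e (off + 1)
    have hsz' : (((c.insert e (off + 1)).size : Int)) ≤ size := by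
      rw [PySem.Dict.size_insert, hc]
      simp only [Bool.false_eq_true, if_false]
      push_cast
      omega
    rw [MGhit_iter size e m (c.insert e (off + 1)) off (off + 1) ho' hsz']
    rw [PySem.Dict.insert_insert_self]
    refine Prod.ext ?_ rfl
    congr 1
    push_cast
    ring

-- the full-bucket case: while the run's element is absent, each step only bumps the offset
-- until the minimal raw count is reached; then the dead keys go and the element enters
theorem MGfull_iter (size : Int) (hpos : 0 < size) (e : String) (c : PySem.Dict String Int)
    (hc : c.contains e = false) (heq : (c.size : Int) = size) :
    ∀ (m : Nat) (off : Int), (∀ p ∈ c.items, off < p.2) →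
    (List.replicate (m + 1) e).foldl (MGstepB size) (c, off) = MGrunStep size (c, off) e (m + 1) := by
  -- the minimum of the raw counts
  have hne : c.values ≠ [] := by
    intro h
    have hit : c.items = [] := by
      simpa [PySem.Dict.values] using h
    rw [show c.size = c.items.length from rfl, hit] at heq
    simp at heq
    omega
  obtain ⟨m0, hm0⟩ : ∃ m0, PySem.List.min? c.values (fun v => v) = some m0 := by
    cases h : PySem.List.min? c.values (fun v => v) with
    | none => exact absurd ((PySem.List.min?_eq_none_iff _ _).mp h) hne
    | some m0 => exact ⟨m0, rfl⟩
  have hm0mem : m0 ∈ c.values := PySem.List.min?_mem hm0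
  have hm0min : ∀ y ∈ c.values, m0 ≤ y := PySem.List.min?_isMin hm0
  intro m
  induction m with
  | zero =>
    intro off hv
    have hm0off : off < m0 := by
      obtain ⟨p, hp, hpv⟩ := List.mem_map.mp hm0mem
      have := hv p hp
      omega
    simp only [List.replicate_succ, List.replicate_zero, List.foldl_cons, List.foldl_nil]
    rw [MGstepB_full_miss size c off e hc heq hpos]
    simp only [MGrunStep, hc, Bool.false_eq_true, if_false,
      show ¬ ((c.size : Int) < size) from by omega, hm0, Option.getD_some]
    by_cases ht1 : m0 - off = 1
    · rw [if_pos (by push_cast; omega), if_neg (by push_cast; omega)]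
      rw [show off + min ((1 : Nat) : Int) (m0 - off) = off + 1 from by push_cast; omega]
    · -- t ≥ 2: no key reaches the offset, nothing is deleted
      rw [if_neg (by push_cast; omega)]
      have hfe : c.items.filter (fun p => p.2 == off + 1) = [] := by
        rw [List.filter_eq_nil_iff]
        intro p hp
        have h1 := hv p hp
        have h2 : m0 ≤ p.2 := hm0min p.2 (List.mem_map.mpr ⟨p, hp, rfl⟩)
        simp only [beq_iff_eq]
        omega
      rw [hfe]
      simp only [List.map_nil, List.foldl_nil]
      rw [show off + min ((1 : Nat) : Int) (m0 - off) = off + 1 from by push_cast; omega]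
  | succ m ih =>
    intro off hv
    have hm0off : off < m0 := by
      obtain ⟨p, hp, hpv⟩ := List.mem_map.mp hm0mem
      have := hv p hp
      omega
    by_cases ht1 : m0 = off + 1
    · -- the minimal keys die now; the rest of the run re-enters e with room
      -- reduce the run-step side first
      simp only [MGrunStep, hc, Bool.false_eq_true, if_false,
        show ¬ ((c.size : Int) < size) from by omega, hm0, Option.getD_some]
      rw [if_pos (by push_cast; omega), if_pos (by push_cast; omega)]
      rw [show off + min (((m + 1 + 1 : Nat)) : Int) (m0 - off) = off + 1 from by push_cast; omega]
      -- now the elementwise side: one decrement step, then a room-run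
      rw [List.replicate_succ, List.foldl_cons]
      rw [MGstepB_full_miss size c off e hc heq hpos]
      have hc'items : (((c.items.filter (fun p => p.2 == off + 1)).map (·.1)).foldl
            (fun dd q => dd.erase q) c).items
          = c.items.filter (fun p => decide (p.1 ∉ (c.items.filter (fun p => p.2 == off + 1)).map (·.1))) :=
        MGeraseFold_items _ c
      have hc'eq : ((c.items.filter (fun p => p.2 == off + 1)).map (·.1)).foldl
            (fun dd q => dd.erase q) c
          = PySem.Dict.mk (c.items.filter (fun p => decide (p.1 ∉ (c.items.filter (fun p => p.2 == off + 1)).map (·.1)))) :=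
        PySem.Dict.ext hc'items
      have hc'c : (((c.items.filter (fun p => p.2 == off + 1)).map (·.1)).foldl
            (fun dd q => dd.erase q) c).contains e = false := by
        rw [hc'eq]
        exact MGcontains_filter c _ e hc
      have hc'lt : ((((c.items.filter (fun p => p.2 == off + 1)).map (·.1)).foldl
            (fun dd q => dd.erase q) c).size : Int) < size := by
        obtain ⟨p0, hp0, hp0v⟩ := List.mem_map.mp hm0mem
        have hp0dk : p0.1 ∈ (c.items.filter (fun p => p.2 == off + 1)).map (·.1) :=
          List.mem_map.mpr ⟨p0, List.mem_filter.mpr ⟨hp0, by simp [hp0v, ht1]⟩, rfl⟩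
        have hlen : (((c.items.filter (fun p => p.2 == off + 1)).map (·.1)).foldl
              (fun dd q => dd.erase q) c).items.length < c.items.length := by
          rw [hc'items]
          apply List.length_filter_lt_length_iff_exists.mpr
          exact ⟨p0, hp0, by simpa using hp0dk⟩
        have h1 : ((((c.items.filter (fun p => p.2 == off + 1)).map (·.1)).foldl
              (fun dd q => dd.erase q) c).size : Int) < (c.size : Int) := by
          simp only [PySem.Dict.size]
          exact_mod_cast hlen
        rwa [heq] at h1
      rw [MGroom_iter size e m _ (off + 1) hc'c hc'lt]
      simp only [Prod.mk.injEq]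
      refine ⟨?_, trivial⟩
      rw [show off + 1 + ((m : Int) + 1)
          = off + 1 + ((((m + 1 + 1 : Nat)) : Int) - (m0 - off)) from by push_cast; omega]
    · -- t ≥ 2: nothing deleted, only the offset advanced; recurse
      rw [List.replicate_succ, List.foldl_cons]
      rw [MGstepB_full_miss size c off e hc heq hpos]
      have hfe : c.items.filter (fun p => p.2 == off + 1) = [] := by
        rw [List.filter_eq_nil_iff]
        intro p hp
        have h1 := hv p hp
        have h2 : m0 ≤ p.2 := hm0min p.2 (List.mem_map.mpr ⟨p, hp, rfl⟩)
        simp only [beq_iff_eq]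
        omega
      rw [hfe]
      simp only [List.map_nil, List.foldl_nil]
      have hv' : ∀ p ∈ c.items, off + 1 < p.2 := by
        intro p hp
        have h2 : m0 ≤ p.2 := hm0min p.2 (List.mem_map.mpr ⟨p, hp, rfl⟩)
        omega
      rw [ih (off + 1) hv']
      -- MGrunStep (c, off+1) e (m+1) = MGrunStep (c, off) e (m+2)
      simp only [MGrunStep, hc, Bool.false_eq_true, if_false,
        show ¬ ((c.size : Int) < size) from by omega, hm0, Option.getD_some]
      split_ifs <;>
        first
          | (exfalso; omega)
          | (simp only [Prod.mk.injEq]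
             try rw [show off + 1 + min (((m + 1 : Nat)) : Int) (m0 - (off + 1))
                 = off + min (((m + 1 + 1 : Nat)) : Int) (m0 - off) from by push_cast; omega]
             exact ⟨by first | trivial | (congr 1; push_cast; omega), by trivial⟩)

-- one run of the offset loop is one MGrunStep
theorem MGrun_sim (size : Int) (hpos : 0 < size) (e : String) (m : Nat)
    (c : PySem.Dict String Int) (off : Int)
    (hsz : (c.size : Int) ≤ size) (hv : ∀ p ∈ c.items, off < p.2) :
    (List.replicate (m + 1) e).foldl (MGstepB size) (c, off) = MGrunStep size (c, off) e (m + 1) := by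
  by_cases hc : c.contains e = true
  · obtain ⟨v, ho⟩ : ∃ v, c.get? e = some v := by
      have := PySem.Dict.contains_eq_isSome_get? c e
      rw [hc] at this
      exact Option.isSome_iff_exists.mp this.symm
    rw [MGhit_iter size e m c off v ho hsz]
    simp [MGrunStep, hc, PySem.Dict.getD_of_get?_eq_some c 0 ho]
  · have hcf : c.contains e = false := by simpa using hc
    by_cases hlt : ((c.size : Int) < size)
    · rw [MGroom_iter size e m c off hcf hlt]
      simp [MGrunStep, hcf, hlt]
    · have heq : (c.size : Int) = size := by omega
      exact MGfull_iter size hpos e c hcf heq m off hv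

-- every leading run of equal elements is literally a replicate-block of the list
theorem MGruns_decomp (e : String) (rest : List String) :
    e :: rest
      = List.replicate (1 + (rest.takeWhile (fun x => x == e)).length) e
          ++ rest.dropWhile (fun x => x == e) := by
  have htw : rest.takeWhile (fun x => x == e)
      = List.replicate (rest.takeWhile (fun x => x == e)).length e := by
    apply List.eq_replicate_of_mem
    intro b hb
    simpa using List.mem_takeWhile_imp hb
  conv_lhs => rw [show rest = rest.takeWhile (fun x => x == e) ++ rest.dropWhile (fun x => x == e) from
    (List.takeWhile_append_dropWhile).symm, htw]
  rw [Nat.add_comm]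
  rw [← List.cons_append, ← List.replicate_succ]

-- the elementwise offset loop equals the run-batched loop
theorem MGfold_runs (size : Int) (hpos : 0 < size) :
    ∀ (n : Nat) (l : List String), l.length ≤ n →
    ∀ (c : PySem.Dict String Int) (off : Int),
    (c.size : Int) ≤ size → (∀ p ∈ c.items, off < p.2) →
    l.foldl (MGstepB size) (c, off)
      = (MGruns l).foldl (fun st p => MGrunStep size st p.1 p.2) (c, off) := by
  intro n
  induction n with
  | zero =>
    intro l hl c off _ _
    have hnil : l = [] := List.eq_nil_of_length_eq_zero (Nat.le_zero.mp hl)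
    subst hnil
    simp [MGruns]
  | succ n ih =>
    intro l hl c off h1 h2
    cases l with
    | nil => simp [MGruns]
    | cons e rest =>
      rw [MGruns]
      conv_lhs => rw [MGruns_decomp e rest]
      simp only [List.foldl_append, List.foldl_cons]
      rw [Nat.add_comm 1 ((rest.takeWhile (fun x => x == e)).length)]
      have hrun := MGrun_sim size hpos e ((rest.takeWhile (fun x => x == e)).length) c off h1 h2
      rw [hrun]
      have hinv := MGfoldB_inv size (List.replicate ((rest.takeWhile (fun x => x == e)).length + 1) e) c off h1 h2
      rw [hrun] at hinv
      have hlen : (rest.dropWhile (fun x => x == e)).length ≤ n := by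
        have h3 := List.length_dropWhile_le (fun x => x == e) rest
        simp only [List.length_cons] at hl
        omega
      have := ih (rest.dropWhile (fun x => x == e)) hlen
        (MGrunStep size (c, off) e ((rest.takeWhile (fun x => x == e)).length + 1)).1
        (MGrunStep size (c, off) e ((rest.takeWhile (fun x => x == e)).length + 1)).2
        hinv.1 hinv.2
      rwa [show ((MGrunStep size (c, off) e ((rest.takeWhile (fun x => x == e)).length + 1)).1,
          (MGrunStep size (c, off) e ((rest.takeWhile (fun x => x == e)).length + 1)).2)
          = MGrunStep size (c, off) e ((rest.takeWhile (fun x => x == e)).length + 1) from rfl] at this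

-- ===== VERDICT (by name: the statement is the Claim_ definition above) =====
theorem Misra_Gries_spec : Claim_equal_Misra_Gries := by
  intro data size _
  unfold Spec_Misra_Gries Misra_Gries Misra_Gries_alt
  by_cases h1 : size < 0
  · rw [if_pos h1]
    rw [MGfoldA_neg size h1 data]
    rfl
  · rw [if_neg h1]
    by_cases h2 : size = 0
    · subst h2
      rw [if_pos rfl]
      rw [MGfoldA_zero data 0]
      simp [PySem.Dict.empty]
    · rw [if_neg h2]
      have hpos : 0 < size := by omega
      obtain ⟨hA1, hA2⟩ := MGfold_rel size data PySem.Dict.empty 0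
      have h0 : PySem.Dict.mk (MGsh 0 (PySem.Dict.empty : PySem.Dict String Int).items)
          = (PySem.Dict.empty : PySem.Dict String Int) := rfl
      rw [h0] at hA1 hA2
      have hruns := MGfold_runs size hpos data.length data (le_refl _) PySem.Dict.empty 0
        (by simp [PySem.Dict.size, PySem.Dict.empty]; omega) (by simp [PySem.Dict.empty])
      rw [hruns] at hA1 hA2
      exact Prod.ext (by simpa [MGsh] using hA1) hA2
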